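-- pv_equiv track=rewrite | github.com/AndrewLamCS/Cryptography-and-Cryptanalysis | Webwork_CH5/CH5_1_OFB.py | ofb
-- ===== SOURCE A (Python) =====
-- def ofb(word):
--     list_of_letters = list(word)
--     xs = [] #list of decimal plaintexts
--     for i in list_of_letters:
--         dec = ord(i)
--         xs.append(dec)
--
--     #Affine Encryption with OFB mode
--     iv = int("0XAA", 16) #in decimal
--     key = int("0X08", 16)
--     ss = []
--     ys = []
--     s0 = (key + 11 * iv) % 256
--     y0 = hex(xs[0] & s0)
--     ss.append(s0)
--     ys.append(y0)
--
--     for i in range(1, len(xs)):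
--         si = (key + 11 * ss[i - 1]) % 256
--         ss.append(si)
--         yi = hex(xs[i] ^ ss[i])
--         ys.append(yi)
--     return xs, ys
-- ===== SOURCE B (Python) =====
-- def ofb(word):
--     # Closed form of the keystream instead of the recurrence:
--     # the affine map s -> (8 + 11*s) % 256 has fixed point 76 (8 + 11*76 = 844 = 76 mod 256),
--     # so s_i = 76 + 11^i * (s_0 - 76) = (76 + 10 * 11**i) % 256, with s_0 = (8 + 11*0xAA) % 256 = 86.
--     # Each keystream element is computed independently by modular exponentiation (random access,
--     # no keystream table and no sequential state).
--     xs = [ord(c) for c in word]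
--     ys = []
--     for i, x in enumerate(xs):
--         s = (76 + 10 * pow(11, i, 256)) % 256
--         ys.append(hex(x & s) if i == 0 else hex(x ^ s))
--     return xs, ys
-- ===== Notes on version B (the rewrite author's own statement) =====
-- stated objective: alternative
-- what changed: A generates the keystream by iterating the affine recurrence s=(8+11*s)%256 with list indexing into the growing ss list; B derives the closed form s_i=(76+10*11^i)%256 from the map's fixed point 76 and computes each keystream element independently with pow(11,i,256), with no recurrence, no ss table and no indexing.
import Mathlib
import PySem

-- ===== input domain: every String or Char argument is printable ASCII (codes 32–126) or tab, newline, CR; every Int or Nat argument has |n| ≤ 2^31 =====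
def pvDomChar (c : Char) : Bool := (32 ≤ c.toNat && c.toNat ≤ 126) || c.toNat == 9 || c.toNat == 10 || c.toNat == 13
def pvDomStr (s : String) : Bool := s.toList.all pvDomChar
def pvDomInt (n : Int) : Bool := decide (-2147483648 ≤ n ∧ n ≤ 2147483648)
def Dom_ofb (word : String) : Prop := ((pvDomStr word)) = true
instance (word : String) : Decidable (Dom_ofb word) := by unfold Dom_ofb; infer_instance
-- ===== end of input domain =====

-- B replaces the sequential OFB keystream recurrence by its closed form
-- s_i = (76 + 10 * 11^i) % 256 (76 is the fixed point of s ↦ (8+11s) mod 256), computing each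
-- keystream element independently by modular exponentiation; objective 'alternative'.

-- shared helper: Python's hex(n) for 0 ≤ n, ported by hand (exact for nonnegative n)
def hexDigit (n : Nat) : Char := if n < 10 then Char.ofNat (48 + n) else Char.ofNat (87 + n)

def hexCore (n : Nat) : List Char :=
  if _h : n < 16 then [hexDigit n]
  else hexCore (n / 16) ++ [hexDigit (n % 16)]
  decreasing_by exact Nat.div_lt_self (by omega) (by omega)

def pyHex (n : Nat) : String := String.ofList ('0' :: 'x' :: hexCore n)

-- ===== PORT A =====
def ofb (word : String) : List Int × List String :=
  let xs : List Int := word.toList.foldl (fun acc c => acc ++ [(c.toNat : Int)]) []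
  let iv : Int := 170       -- int("0XAA", 16)
  let key : Int := 8        -- int("0X08", 16)
  let s0 : Int := PySem.Int.mod (key + 11 * iv) 256
  -- xs[0]: Python raises IndexError on the empty word; Pre_ofb excludes it (pyGetD default unreachable)
  let y0 : String := pyHex (PySem.Int.band (PySem.List.pyGetD xs 0 0) s0).toNat
  let ss : List Int := [s0]
  let ys : List String := [y0]
  let st := (PySem.List.pyRange 1 (xs.length : Int) 1).foldl
    (fun (st : List Int × List String) (i : Int) =>
      let si := PySem.Int.mod (key + 11 * PySem.List.pyGetD st.1 (i - 1) 0) 256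
      let ss' := st.1 ++ [si]
      let yi := pyHex (PySem.Int.bxor (PySem.List.pyGetD xs i 0) (PySem.List.pyGetD ss' i 0)).toNat
      (ss', st.2 ++ [yi])) (ss, ys)
  (xs, st.2)

-- ===== PORT B =====
-- closed-form keystream: s_i = (76 + 10 * pow(11, i, 256)) % 256 (exponent i is the
-- enumerate index, always ≥ 0, so .toNat is exact)
def ofb_alt (word : String) : List Int × List String :=
  let xs : List Int := word.toList.map (fun c => (c.toNat : Int))
  let ys : List String := (PySem.List.enumerate xs 0).foldl
    (fun (acc : List String) p =>
      let s : Int := PySem.Int.mod (76 + 10 * PySem.Int.powMod 11 p.1.toNat 256) 256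
      acc ++ [if p.1 = 0 then pyHex (PySem.Int.band p.2 s).toNat
              else pyHex (PySem.Int.bxor p.2 s).toNat]) []
  (xs, ys)

-- ===== PRECONDITION & SPEC =====
-- Pre_ excludes only the empty string, on which A raises IndexError (xs[0]).
def Pre_ofb (word : String) : Prop := word ≠ ""
instance (word : String) : Decidable (Pre_ofb word) := by unfold Pre_ofb; infer_instance
def pvWitness_ofb : String := "Hi"

def Spec_ofb (word : String) (out : List Int × List String) : Prop := out = ofb_alt word
instance (word : String) (out : List Int × List String) : Decidable (Spec_ofb word out) := by unfold Spec_ofb; infer_instance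

-- ===== CLAIM (what is proved, stated in full; the proofs are below) =====
def Claim_equal_ofb : Prop := ∀ (word : String), Dom_ofb word → Pre_ofb word → Spec_ofb word (ofb word)

-- ===== LEMMAS AND PROOFS =====

-- the OFB keystream of A: S 0 = (8 + 11*0xAA) % 256, S (k+1) = (8 + 11 * S k) % 256
def S : Nat → Int
  | 0 => PySem.Int.mod (8 + 11 * 170) 256
  | k + 1 => PySem.Int.mod (8 + 11 * S k) 256

-- B's closed form agrees with A's recurrence
theorem S_closed (k : Nat) : S k = PySem.Int.mod (76 + 10 * PySem.Int.powMod 11 k 256) 256 := by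
  induction k with
  | zero => decide
  | succ k ih =>
    show PySem.Int.mod (8 + 11 * S k) 256 = _
    rw [ih, PySem.Int.powMod_eq, PySem.Int.powMod_eq]
    simp only [PySem.Int.mod_eq_emod_of_pos (show (0:Int) < 256 by norm_num)]
    have hp : (11 : Int) ^ (k + 1) % 256 = (11 * ((11 : Int) ^ k % 256)) % 256 := by
      rw [pow_succ, Int.mul_emod, Int.mul_emod 11 _, Int.emod_emod_of_dvd _ dvd_rfl]
      norm_num [mul_comm]
    rw [hp]
    generalize (11 : Int) ^ k % 256 = r
    omega

-- the common value of both ys lists, indexed over List.range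
def specYs (xs : List Int) (n : Nat) : List String :=
  (List.range n).map (fun (i : Nat) =>
    if i = 0 then pyHex (PySem.Int.band (PySem.List.pyGetD xs ((i : Nat) : Int) 0) (S i)).toNat
    else pyHex (PySem.Int.bxor (PySem.List.pyGetD xs ((i : Nat) : Int) 0) (S i)).toNat)

theorem getD_map_range_S (n k : Nat) (hk : k < n) (d : Int) :
    PySem.List.pyGetD ((List.range n).map S) (k : Int) d = S k := by
  simp [PySem.List.pyGetD_natCast, List.getD, List.getElem?_map, List.getElem?_range hk]

theorem A_loop (xs : List Int) (ys0 : List String) (m : Nat) :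
    (PySem.List.pyRange 1 (1 + (m : Int)) 1).foldl
      (fun (st : List Int × List String) (i : Int) =>
        let si := PySem.Int.mod (8 + 11 * PySem.List.pyGetD st.1 (i - 1) 0) 256
        let ss' := st.1 ++ [si]
        let yi := pyHex (PySem.Int.bxor (PySem.List.pyGetD xs i 0) (PySem.List.pyGetD ss' i 0)).toNat
        (ss', st.2 ++ [yi])) ([S 0], ys0)
    = ((List.range (m + 1)).map S,
       ys0 ++ (List.range m).map (fun (j : Nat) =>
         pyHex (PySem.Int.bxor (PySem.List.pyGetD xs (((j : Nat) : Int) + 1) 0) (S (j + 1))).toNat)) := by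
  induction m with
  | zero =>
    rw [PySem.List.pyRange_one_eq_nil (by omega)]
    simp [List.range_one]
  | succ m ih =>
    have hsplit : (1 : Int) + ((m : Int) + 1) = (1 + (m : Int)) + 1 := by ring
    rw [show ((m + 1 : Nat) : Int) = (m : Int) + 1 by push_cast; ring, hsplit,
        PySem.List.pyRange_one_succ_right (by omega), List.foldl_append, ih]
    simp only [List.foldl_cons, List.foldl_nil]
    have h1 : (1 : Int) + (m : Int) - 1 = (m : Int) := by ring
    have hgm : PySem.List.pyGetD ((List.range (m + 1)).map S) ((m : Int)) 0 = S m :=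
      getD_map_range_S (m + 1) m (by omega) 0
    have hss' : (List.range (m + 1)).map S ++ [S (m + 1)] = (List.range (m + 2)).map S := by
      simp [List.range_succ]
    have hsm : PySem.Int.mod (8 + 11 * S m) 256 = S (m + 1) := rfl
    simp only [h1, hgm, hsm, hss']
    have hg2 : PySem.List.pyGetD ((List.range (m + 2)).map S) ((1 : Int) + (m : Int)) 0 = S (m + 1) := by
      rw [show (1 : Int) + (m : Int) = ((m + 1 : Nat) : Int) by push_cast; ring]
      exact getD_map_range_S (m + 2) (m + 1) (by omega) 0
    rw [hg2]
    refine Prod.ext rfl ?_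
    simp only [List.range_succ, List.map_append, List.append_assoc, List.map]
    congr 2
    rw [show ((m : Int)) + 1 = (1 : Int) + (m : Int) by ring]

theorem A_ys (xs : List Int) (hne : xs ≠ []) :
    (((PySem.List.pyRange 1 (xs.length : Int) 1).foldl
      (fun (st : List Int × List String) (i : Int) =>
        let si := PySem.Int.mod (8 + 11 * PySem.List.pyGetD st.1 (i - 1) 0) 256
        let ss' := st.1 ++ [si]
        let yi := pyHex (PySem.Int.bxor (PySem.List.pyGetD xs i 0) (PySem.List.pyGetD ss' i 0)).toNat
        (ss', st.2 ++ [yi]))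
      ([S 0], [pyHex (PySem.Int.band (PySem.List.pyGetD xs 0 0) (S 0)).toNat])).2)
    = specYs xs xs.length := by
  obtain ⟨m, hm⟩ : ∃ m, xs.length = m + 1 :=
    ⟨xs.length - 1, by have := List.length_pos_iff.mpr hne; omega⟩
  rw [hm, show ((m + 1 : Nat) : Int) = 1 + (m : Int) by push_cast; ring, A_loop]
  unfold specYs
  rw [List.range_succ_eq_map]
  simp only [List.map_cons, List.map_map, List.singleton_append]
  congr 1

theorem B_ys (xs : List Int) :
    (PySem.List.enumerate xs 0).map
      (fun p => if p.1 = 0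
        then pyHex (PySem.Int.band p.2
          (PySem.Int.mod (76 + 10 * PySem.Int.powMod 11 p.1.toNat 256) 256)).toNat
        else pyHex (PySem.Int.bxor p.2
          (PySem.Int.mod (76 + 10 * PySem.Int.powMod 11 p.1.toNat 256) 256)).toNat)
    = specYs xs xs.length := by
  apply List.ext_getElem
  · simp [specYs, PySem.List.length_enumerate]
  · intro i h1 h2
    have hi : i < xs.length := by
      simpa [PySem.List.length_enumerate] using h1
    simp only [List.getElem_map, PySem.List.getElem_enumerate, specYs, List.getElem_range]
    have hx : PySem.List.pyGetD xs (i : Int) 0 = xs[i] := by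
      simp [PySem.List.pyGetD_natCast, List.getD, List.getElem?_eq_getElem hi]
    have hs : PySem.Int.mod (76 + 10 * PySem.Int.powMod 11 ((0 : Int) + (i : Int)).toNat 256) 256 = S i := by
      rw [show ((0 : Int) + (i : Int)).toNat = i by omega, ← S_closed]
    rcases Nat.eq_zero_or_pos i with h0 | h0
    · subst h0
      simp only [Nat.cast_zero, add_zero, Int.toNat_zero] at hx hs ⊢
      simp only [if_true]
      rw [hx, hs]
    · rw [if_neg (by omega), if_neg (by omega), hx, hs]

theorem foldl_append_map (l : List Char) :
    l.foldl (fun acc c => acc ++ [(c.toNat : Int)]) [] = l.map (fun c => (c.toNat : Int)) := by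
  simpa using PySem.List.foldl_append_singleton_eq_map (fun (c : Char) => (c.toNat : Int)) l []

-- ===== VERDICT (by name: the statement is the Claim_ definition above) =====
theorem ofb_spec : Claim_equal_ofb := by
  unfold Claim_equal_ofb
  intro word _ hpre
  unfold Spec_ofb ofb ofb_alt
  simp only [foldl_append_map]
  set xs : List Int := word.toList.map (fun c => (c.toNat : Int)) with hxs
  have hne : xs ≠ [] := by
    simp only [hxs, ne_eq, List.map_eq_nil_iff]
    intro h
    exact hpre (by rwa [← String.toList_eq_nil_iff])
  refine Prod.ext rfl ?_
  show _ = (PySem.List.enumerate xs 0).foldl _ []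
  rw [show (PySem.List.enumerate xs 0).foldl
      (fun (acc : List String) p =>
        let s : Int := PySem.Int.mod (76 + 10 * PySem.Int.powMod 11 p.1.toNat 256) 256
        acc ++ [if p.1 = 0 then pyHex (PySem.Int.band p.2 s).toNat
                else pyHex (PySem.Int.bxor p.2 s).toNat]) []
      = (PySem.List.enumerate xs 0).map
        (fun p => if p.1 = 0
          then pyHex (PySem.Int.band p.2
            (PySem.Int.mod (76 + 10 * PySem.Int.powMod 11 p.1.toNat 256) 256)).toNat
          else pyHex (PySem.Int.bxor p.2
            (PySem.Int.mod (76 + 10 * PySem.Int.powMod 11 p.1.toNat 256) 256)).toNat)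
    from by
      simpa using PySem.List.foldl_append_singleton_eq_map
        (fun (p : Int × Int) => if p.1 = 0
          then pyHex (PySem.Int.band p.2
            (PySem.Int.mod (76 + 10 * PySem.Int.powMod 11 p.1.toNat 256) 256)).toNat
          else pyHex (PySem.Int.bxor p.2
            (PySem.Int.mod (76 + 10 * PySem.Int.powMod 11 p.1.toNat 256) 256)).toNat)
        (PySem.List.enumerate xs 0) []]
  rw [B_ys xs]
  exact A_ys xs hne
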